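-- pv_equiv track=rewrite | github.com/ilyes-smaouii/advent_of_code_2024 | day_02/day_02.py | line_is_good_tolerant
-- ===== SOURCE A (Python) =====
-- def line_is_good(line) :
--     direction = -1
--     line_good = True
--     if (line[0] < line[1]) :
--         direction = 1
--     for i in range(len(line) - 1) :
--         if not(1 <= ((line[i+1] - line[i]) * direction) <= 3) :
--             line_good = False
--     return line_good
--
-- def line_is_good_tolerant(line) :
--     line_good = line_is_good(line)
--     if (line_good) :
--         return True
--     for i in range(len(line)) :
--         if (line_is_good(line[:i] + line[i+1:])) :
--             return True
--     return False
-- ===== SOURCE B (Python) =====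
-- def line_is_good_tolerant(line):
--     # Linear scan: for each direction, find the first bad gap and test only the
--     # two removals that can fix it (remove its left or right endpoint).
--     def first_bad(seq, lo, hi):
--         for i in range(len(seq) - 1):
--             if not (lo <= seq[i + 1] - seq[i] <= hi):
--                 return i
--         return None
--
--     def tolerant_dir(lo, hi):
--         j = first_bad(line, lo, hi)
--         if j is None:
--             return True
--         return (first_bad(line[:j] + line[j + 1:], lo, hi) is None
--                 or first_bad(line[:j + 1] + line[j + 2:], lo, hi) is None)
--
--     return tolerant_dir(1, 3) or tolerant_dir(-3, -1)
-- ===== Notes on version B (the rewrite author's own statement) =====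
-- stated objective: faster
-- what changed: Instead of re-checking the whole list for every one of the n possible removals (quadratic), B scans once per direction, finds the first bad gap and tests only the two removals (its left or right endpoint) that could possibly repair it.
import Mathlib
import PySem

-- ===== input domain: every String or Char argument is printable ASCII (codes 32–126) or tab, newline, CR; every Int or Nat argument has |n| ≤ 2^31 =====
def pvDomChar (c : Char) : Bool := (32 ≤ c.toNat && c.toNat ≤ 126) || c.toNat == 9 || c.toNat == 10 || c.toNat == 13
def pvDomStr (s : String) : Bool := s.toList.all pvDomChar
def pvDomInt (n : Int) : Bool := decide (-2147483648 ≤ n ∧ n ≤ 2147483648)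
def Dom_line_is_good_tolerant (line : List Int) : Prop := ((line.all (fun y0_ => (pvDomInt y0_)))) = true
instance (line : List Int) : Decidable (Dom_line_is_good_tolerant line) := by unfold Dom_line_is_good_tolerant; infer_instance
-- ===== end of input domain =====

-- B replaces A's try-every-removal quadratic scan by one linear pass per direction:
-- find the first bad gap and test only the two removals (its endpoints) that could fix it.

-- ===== PORT A =====
def line_is_good (line : List Int) : Bool :=
  let direction : Int := if line.getD 0 0 < line.getD 1 0 then 1 else -1
  (List.range (line.length - 1)).foldl
    (fun line_good i =>
      if !(decide (1 ≤ (line.getD (i+1) 0 - line.getD i 0) * direction) &&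
           decide ((line.getD (i+1) 0 - line.getD i 0) * direction ≤ 3)) then false
      else line_good)
    true

def line_is_good_tolerant (line : List Int) : Bool :=
  if line_is_good line then true
  else (List.range line.length).any (fun i =>
    line_is_good (line.take i ++ line.drop (i+1)))

-- ===== PORT B =====
def pvFirstBad (seq : List Int) (lo hi : Int) : Option Nat :=
  (List.range (seq.length - 1)).find? (fun i =>
    !(decide (lo ≤ seq.getD (i+1) 0 - seq.getD i 0) &&
      decide (seq.getD (i+1) 0 - seq.getD i 0 ≤ hi)))

def pvTolerantDir (line : List Int) (lo hi : Int) : Bool :=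
  match pvFirstBad line lo hi with
  | none => true
  | some j =>
      (pvFirstBad (line.take j ++ line.drop (j+1)) lo hi).isNone ||
      (pvFirstBad (line.take (j+1) ++ line.drop (j+2)) lo hi).isNone

def line_is_good_tolerant_alt (line : List Int) : Bool :=
  pvTolerantDir line 1 3 || pvTolerantDir line (-3) (-1)

-- ===== PRECONDITION & SPEC =====
-- Pre_ excludes exactly the inputs where Python A raises IndexError: lists shorter
-- than 2, and length-2 lists whose single gap is bad (A then indexes a 1-element slice).
def Pre_line_is_good_tolerant (line : List Int) : Prop :=
  3 ≤ line.length ∨ (line.length = 2 ∧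
    ((1 ≤ line.getD 1 0 - line.getD 0 0 ∧ line.getD 1 0 - line.getD 0 0 ≤ 3) ∨
     (-3 ≤ line.getD 1 0 - line.getD 0 0 ∧ line.getD 1 0 - line.getD 0 0 ≤ -1)))
instance (line : List Int) : Decidable (Pre_line_is_good_tolerant line) := by
  unfold Pre_line_is_good_tolerant; infer_instance
def pvWitness_line_is_good_tolerant : List Int := ([1, 2, 3])

def Spec_line_is_good_tolerant (line : List Int) (out : Bool) : Prop :=
  out = line_is_good_tolerant_alt line
instance (line : List Int) (out : Bool) : Decidable (Spec_line_is_good_tolerant line out) := by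
  unfold Spec_line_is_good_tolerant; infer_instance

-- ===== CLAIM (what is proved, stated in full; the proofs are below) =====
def Claim_equal_line_is_good_tolerant : Prop := ∀ (line : List Int), Dom_line_is_good_tolerant line → Pre_line_is_good_tolerant line → Spec_line_is_good_tolerant line (line_is_good_tolerant line)

-- ===== LEMMAS AND PROOFS =====

/-- the gap after position `k` -/
def pvGap (xs : List Int) (k : Nat) : Int := xs.getD (k+1) 0 - xs.getD k 0

/-- all gaps within `[lo, hi]` -/
def pvOk (lo hi : Int) (xs : List Int) : Prop :=
  ∀ k, k + 1 < xs.length → lo ≤ pvGap xs k ∧ pvGap xs k ≤ hi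

/-- remove element `i` -/
def pvDel (xs : List Int) (i : Nat) : List Int := xs.take i ++ xs.drop (i+1)

theorem pv_foldl_flag (p : Nat → Bool) (l : List Nat) (b : Bool) :
    l.foldl (fun g i => if p i then false else g) b = (b && l.all (fun i => !p i)) := by
  induction l generalizing b with
  | nil => simp
  | cons a l ih =>
    simp only [List.foldl_cons, List.all_cons, ih]
    cases p a <;> simp

theorem pv_good_iff (xs : List Int) (h2 : 2 ≤ xs.length) :
    line_is_good xs = true ↔ pvOk 1 3 xs ∨ pvOk (-3) (-1) xs := by
  unfold line_is_good
  rw [pv_foldl_flag]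
  simp only [Bool.true_and, List.all_eq_true, List.mem_range, Bool.not_not,
    Bool.and_eq_true, decide_eq_true_eq]
  unfold pvOk pvGap
  by_cases hd : xs.getD 0 0 < xs.getD 1 0
  · simp only [if_pos hd]
    constructor
    · intro h
      left
      intro k hk
      have := h k (by omega)
      constructor <;> nlinarith [this.1, this.2]
    · rintro (h | h)
      · intro k hk
        have := h k (by omega)
        constructor <;> nlinarith [this.1, this.2]
      · have := h 0 (by omega)
        simp only [Nat.zero_add] at this
        omega
  · simp only [if_neg hd]
    constructor
    · intro h
      right
      intro k hk
      have := h k (by omega)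
      constructor <;> nlinarith [this.1, this.2]
    · rintro (h | h)
      · have := h 0 (by omega)
        simp only [Nat.zero_add] at this
        omega
      · intro k hk
        have := h k (by omega)
        constructor <;> nlinarith [this.1, this.2]

theorem pv_good_of_ok (xs : List Int) (lo hi : Int) (h2 : 2 ≤ xs.length)
    (hd : (lo = 1 ∧ hi = 3) ∨ (lo = -3 ∧ hi = -1)) (h : pvOk lo hi xs) :
    line_is_good xs = true := by
  rw [pv_good_iff xs h2]
  rcases hd with ⟨rfl, rfl⟩ | ⟨rfl, rfl⟩
  · exact Or.inl h
  · exact Or.inr h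

theorem pv_firstBad_none (xs : List Int) (lo hi : Int) :
    pvFirstBad xs lo hi = none ↔ pvOk lo hi xs := by
  unfold pvFirstBad pvOk pvGap
  rw [List.find?_eq_none]
  simp only [List.mem_range, Bool.not_eq_true', Bool.and_eq_false_iff,
    decide_eq_false_iff_not, not_le]
  constructor
  · intro h k hk
    have := h k (by omega)
    constructor <;> omega
  · intro h k hk
    have := h k (by omega)
    omega

theorem pv_firstBad_some (xs : List Int) (lo hi : Int) (j : Nat)
    (h : pvFirstBad xs lo hi = some j) :
    j + 1 < xs.length ∧ ¬(lo ≤ pvGap xs j ∧ pvGap xs j ≤ hi) := by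
  have hmem := List.mem_of_find?_eq_some h
  have hp := List.find?_some h
  rw [List.mem_range] at hmem
  simp only [Bool.not_eq_eq_eq_not, Bool.not_true, Bool.and_eq_false_iff,
    decide_eq_false_iff_not, not_le] at hp
  refine ⟨by omega, ?_⟩
  unfold pvGap
  intro ⟨h1, h2⟩
  rcases hp with hp | hp <;> omega

theorem pv_del_length (xs : List Int) (i : Nat) (h : i < xs.length) :
    (pvDel xs i).length = xs.length - 1 := by
  simp [pvDel]; omega

theorem pv_del_getD (xs : List Int) (i k : Nat) (h : i < xs.length) :
    (pvDel xs i).getD k 0 = if k < i then xs.getD k 0 else xs.getD (k+1) 0 := by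
  simp only [pvDel, List.getD_eq_getElem?_getD, List.getElem?_append, List.length_take,
    Nat.min_eq_left (Nat.le_of_lt h)]
  split_ifs with h1
  · rw [List.getElem?_take_of_lt (by omega)]
  · rw [List.getElem?_drop]
    congr 2
    omega

theorem pv_key (xs : List Int) (lo hi : Int) (i j : Nat)
    (hi' : i < xs.length) (hj : j + 1 < xs.length)
    (hbad : ¬(lo ≤ pvGap xs j ∧ pvGap xs j ≤ hi))
    (hok : pvOk lo hi (pvDel xs i)) : i = j ∨ i = j + 1 := by
  by_contra hc
  simp only [not_or] at hc
  have hlen := pv_del_length xs i hi'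
  rcases Nat.lt_or_ge i j with hlt | hge
  · have := hok (j - 1) (by omega)
    unfold pvGap at this hbad
    rw [pv_del_getD xs i _ hi', pv_del_getD xs i _ hi'] at this
    rw [if_neg (by omega), if_neg (by omega)] at this
    have hj1 : j - 1 + 1 = j := by omega
    rw [hj1] at this
    exact hbad ⟨by omega, by omega⟩
  · have hgt : j + 1 < i := by omega
    have := hok j (by omega)
    unfold pvGap at this hbad
    rw [pv_del_getD xs i _ hi', pv_del_getD xs i _ hi'] at this
    rw [if_pos (by omega), if_pos (by omega)] at this
    exact hbad this

theorem pv_tol_of_ok (line : List Int) (lo hi : Int) (hok : pvOk lo hi line) :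
    pvTolerantDir line lo hi = true := by
  unfold pvTolerantDir
  rw [(pv_firstBad_none line lo hi).mpr hok]

theorem pv_tol_of_del (line : List Int) (lo hi : Int) (i : Nat)
    (hi' : i < line.length) (hok : pvOk lo hi (pvDel line i)) :
    pvTolerantDir line lo hi = true := by
  unfold pvTolerantDir
  cases h : pvFirstBad line lo hi with
  | none => rfl
  | some j =>
    obtain ⟨hj, hbad⟩ := pv_firstBad_some line lo hi j h
    rcases pv_key line lo hi i j hi' hj hbad hok with heq | heq <;> rw [heq] at hok
    · have hn : pvFirstBad (line.take j ++ line.drop (j+1)) lo hi = none :=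
        (pv_firstBad_none (line.take j ++ line.drop (j+1)) lo hi).mpr hok
      simp [hn]
    · have hn : pvFirstBad (line.take (j+1) ++ line.drop (j+2)) lo hi = none :=
        (pv_firstBad_none (line.take (j+1) ++ line.drop (j+2)) lo hi).mpr hok
      simp [hn]

theorem pv_pre2_good (line : List Int) (h2 : line.length = 2)
    (hp : (1 ≤ line.getD 1 0 - line.getD 0 0 ∧ line.getD 1 0 - line.getD 0 0 ≤ 3) ∨
          (-3 ≤ line.getD 1 0 - line.getD 0 0 ∧ line.getD 1 0 - line.getD 0 0 ≤ -1)) :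
    line_is_good line = true := by
  rw [pv_good_iff line (by omega)]
  rcases hp with hp | hp
  · left
    intro k hk
    have hk0 : k = 0 := by omega
    subst hk0
    exact hp
  · right
    intro k hk
    have hk0 : k = 0 := by omega
    subst hk0
    exact hp

theorem pv_A_eq (line : List Int) :
    line_is_good_tolerant line
      = (line_is_good line || (List.range line.length).any (fun i =>
          line_is_good (line.take i ++ line.drop (i+1)))) := by
  unfold line_is_good_tolerant
  cases h : line_is_good line
  · simp [h]
  · simp

theorem pv_A_of_tol (line : List Int) (lo hi : Int)
    (hpre : Pre_line_is_good_tolerant line)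
    (hd : (lo = 1 ∧ hi = 3) ∨ (lo = -3 ∧ hi = -1))
    (h : pvTolerantDir line lo hi = true) :
    line_is_good_tolerant line = true := by
  have h2 : 2 ≤ line.length := by
    rcases hpre with h3 | ⟨hl, _⟩ <;> omega
  rw [pv_A_eq]
  unfold pvTolerantDir at h
  cases hfb : pvFirstBad line lo hi with
  | none =>
    have hok := (pv_firstBad_none line lo hi).mp hfb
    rw [pv_good_of_ok line lo hi h2 hd hok]
    rfl
  | some j =>
    rcases hpre with h3 | ⟨hl, hp⟩
    · rw [hfb] at h
      obtain ⟨hj, _⟩ := pv_firstBad_some line lo hi j hfb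
      rcases Bool.or_eq_true_iff.mp h with hdel | hdel
      · have hnone := Option.isNone_iff_eq_none.mp hdel
        have hok : pvOk lo hi (pvDel line j) :=
          (pv_firstBad_none (line.take j ++ line.drop (j+1)) lo hi).mp hnone
        have hgood : line_is_good (pvDel line j) = true :=
          pv_good_of_ok _ lo hi (by rw [pv_del_length line j (by omega)]; omega) hd hok
        have hany : (List.range line.length).any (fun i =>
            line_is_good (line.take i ++ line.drop (i+1))) = true := by
          rw [List.any_eq_true]
          exact ⟨j, by rw [List.mem_range]; omega, hgood⟩
        rw [hany]
        simp
      · have hnone := Option.isNone_iff_eq_none.mp hdel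
        have hok : pvOk lo hi (pvDel line (j+1)) :=
          (pv_firstBad_none (line.take (j+1) ++ line.drop (j+2)) lo hi).mp hnone
        have hgood : line_is_good (pvDel line (j+1)) = true :=
          pv_good_of_ok _ lo hi (by rw [pv_del_length line (j+1) (by omega)]; omega) hd hok
        have hany : (List.range line.length).any (fun i =>
            line_is_good (line.take i ++ line.drop (i+1))) = true := by
          rw [List.any_eq_true]
          exact ⟨j+1, by rw [List.mem_range]; omega, hgood⟩
        rw [hany]
        simp
    · rw [pv_pre2_good line hl hp]
      rfl

theorem pv_main (line : List Int) (hpre : Pre_line_is_good_tolerant line) :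
    line_is_good_tolerant line = line_is_good_tolerant_alt line := by
  have h2 : 2 ≤ line.length := by
    rcases hpre with h3 | ⟨hl, _⟩ <;> omega
  rw [Bool.eq_iff_iff]
  constructor
  · intro hA
    rw [pv_A_eq] at hA
    unfold line_is_good_tolerant_alt
    rcases Bool.or_eq_true_iff.mp hA with hg | hany
    · rcases (pv_good_iff line h2).mp hg with hok | hok
      · rw [pv_tol_of_ok line 1 3 hok]
        rfl
      · rw [pv_tol_of_ok line (-3) (-1) hok]
        simp
    · obtain ⟨i, hmem, hgood⟩ := List.any_eq_true.mp hany
      rw [List.mem_range] at hmem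
      have hgood' : line_is_good (pvDel line i) = true := hgood
      have hlen : (pvDel line i).length = line.length - 1 := pv_del_length line i hmem
      rcases hpre with h3 | ⟨hl, hp⟩
      · rcases (pv_good_iff _ (by omega)).mp hgood' with hok | hok
        · rw [pv_tol_of_del line 1 3 i hmem hok]
          rfl
        · rw [pv_tol_of_del line (-3) (-1) i hmem hok]
          simp
      · rcases (pv_good_iff line h2).mp (pv_pre2_good line hl hp) with hok | hok
        · rw [pv_tol_of_ok line 1 3 hok]
          rfl
        · rw [pv_tol_of_ok line (-3) (-1) hok]
          simp
  · intro hB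
    unfold line_is_good_tolerant_alt at hB
    rcases Bool.or_eq_true_iff.mp hB with h | h
    · exact pv_A_of_tol line 1 3 hpre (Or.inl ⟨rfl, rfl⟩) h
    · exact pv_A_of_tol line (-3) (-1) hpre (Or.inr ⟨rfl, rfl⟩) h

-- ===== VERDICT (by name: the statement is the Claim_ definition above) =====
theorem line_is_good_tolerant_spec : Claim_equal_line_is_good_tolerant := by
  intro line _ hpre
  exact pv_main line hpre
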